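-- pv_equiv track=rewrite | github.com/jarrodthuener/AdventOfCode | AOC_2022/python/Day7.py | day7
-- ===== SOURCE A (Python) =====
-- import itertools
--
-- def day7(s, part2=False):
--   stack, sizes = [], []
--   for line in s:
--     if line == '$ cd ..':
--       size = stack.pop()
--       sizes.append(size)
--       stack[-1] += size
--     elif line.startswith('$ cd '):
--       stack.append(0)
--     elif line[0].isdigit():
--       stack[-1] += int(line.split()[0])
--   sizes.extend(itertools.accumulate(stack[::-1]))
--   return (sum(s for s in sizes if s <= 100_000) if not part2 else
--           min(s for s in sizes if s >= max(sizes) - 40_000_000))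
-- ===== SOURCE B (Python) =====
-- def day7(s, part2=False):
--     # Recursive-descent parse: each `$ cd name` opens a nested walk; the walk's
--     # return closes a directory and records its full size.
--     sizes = []
--     n = len(s)
--
--     def walk(i):
--         # Parse the contents of the current directory starting at line i.
--         # Returns (total size of this directory, index of the next unconsumed line).
--         total = 0
--         while i < n:
--             line = s[i]
--             if line == '$ cd ..':
--                 return total, i + 1
--             if line.startswith('$ cd '):
--                 sub, i = walk(i + 1)
--                 sizes.append(sub)
--                 total += sub
--             else:
--                 if line and line[0].isdigit():
--                     total += int(line.split()[0])
--                 i += 1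
--         return total, i
--
--     walk(0)  # top level is not itself a directory: its total is discarded
--     if not part2:
--         return sum(x for x in sizes if x <= 100_000)
--     limit = max(sizes) - 40_000_000
--     return min(x for x in sizes if x >= limit)
-- ===== Notes on version B (the rewrite author's own statement) =====
-- stated objective: alternative
-- what changed: A runs one flat loop over the lines with an explicit stack of pending directory totals plus a final accumulate over the leftover stack; B is a recursive-descent parser (one nested walk per '$ cd name') that closes each directory when its walk returns, so no stack and no post-pass exist.
import Mathlib
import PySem

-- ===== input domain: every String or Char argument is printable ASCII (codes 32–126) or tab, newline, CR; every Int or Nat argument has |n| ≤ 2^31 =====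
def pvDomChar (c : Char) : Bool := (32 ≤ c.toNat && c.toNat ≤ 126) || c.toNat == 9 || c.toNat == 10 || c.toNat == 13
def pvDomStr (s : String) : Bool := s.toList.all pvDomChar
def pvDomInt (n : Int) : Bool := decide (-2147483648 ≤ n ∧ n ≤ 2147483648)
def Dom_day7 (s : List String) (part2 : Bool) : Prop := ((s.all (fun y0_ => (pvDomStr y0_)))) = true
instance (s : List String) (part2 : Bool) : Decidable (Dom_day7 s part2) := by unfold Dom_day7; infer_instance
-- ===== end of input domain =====

-- B replaces A's flat stack-plus-final-accumulate loop by a recursive-descent parse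
-- (one nested walk per '$ cd name'); equal return values are proved on Pre_day7.

-- ===== PORT A =====
-- line[0].isdigit() (none = IndexError on the empty line, treated as false; outside Pre_)
def pvDigitA (line : String) : Bool :=
  match PySem.Str.pyGet? line 0 with
  | some c => PySem.Chars.isdigit c
  | none => false

-- int(line.split()[0]); the .getD 0 defaults are only reached outside Pre_ (ValueError/IndexError)
def pvValA (line : String) : Int :=
  match (PySem.Str.split₀ line).head? with
  | some t => (PySem.Int.ofStr? t).getD 0
  | none => 0

-- the body of A's for-loop; stack top is the list head (Python's stack[-1])
def pvStepA (st : List Int × List Int) (line : String) : List Int × List Int :=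
  if line = "$ cd .." then
    match st.1 with
    | size :: top :: rest => ((top + size) :: rest, st.2 ++ [size])
    | _ => st          -- Python raises IndexError here; outside Pre_
  else if PySem.Str.startswith line "$ cd " then (0 :: st.1, st.2)
  else if pvDigitA line then
    match st.1 with
    | top :: rest => ((top + pvValA line) :: rest, st.2)
    | [] => st         -- Python raises IndexError here; outside Pre_
  else st

-- itertools.accumulate(stack[::-1]) (head of our stack = Python's last element); hand port, exact
def pvAccum : List Int → Int → List Int
  | [], _ => []
  | a :: r, c => (c + a) :: pvAccum r (c + a)

def day7 (s : List String) (part2 : Bool) : Int :=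
  let st := s.foldl pvStepA ([], [])
  let sizes := st.2 ++ pvAccum st.1 0
  if !part2 then (sizes.filter (fun x => x ≤ 100000)).sum
  else
    -- max(sizes) / min(generator): hand port of Python max/min on ints, exact on nonempty lists;
    -- the [] => 0 defaults correspond to Python's ValueError, outside Pre_
    let m := match sizes with | [] => 0 | h :: t => t.foldl max h
    match sizes.filter (fun x => m - 40000000 ≤ x) with
    | [] => 0
    | h :: t => t.foldl min h

-- ===== PORT B =====
def pvDigitB (line : String) : Bool :=
  match PySem.Str.pyGet? line 0 with
  | some c => PySem.Chars.isdigit c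
  | none => false

def pvValB (line : String) : Int :=
  match (PySem.Str.split₀ line).head? with
  | some t => (PySem.Int.ofStr? t).getD 0
  | none => 0

-- Source B's walk(i): parses the current directory's contents; returns (total, sizes
-- appended during the walk, remaining lines). The index i becomes the remaining-line
-- list; the subtype bound is the termination measure (rem is never longer than the input).
def pvWalkB : (l : List String) → Int × List Int × {rem : List String // rem.length ≤ l.length}
  | [] => (0, [], ⟨[], Nat.le_refl 0⟩)
  | line :: rest =>
    if line = "$ cd .." then (0, [], ⟨rest, Nat.le_succ rest.length⟩)
    else if PySem.Str.startswith line "$ cd " then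
      let r1 := pvWalkB rest
      let r2 := pvWalkB r1.2.2.val
      (r1.1 + r2.1, r1.2.1 ++ [r1.1] ++ r2.2.1,
        ⟨r2.2.2.val, Nat.le_trans r2.2.2.property (Nat.le_trans r1.2.2.property (Nat.le_succ _))⟩)
    else
      let v := if !(line = "") && pvDigitB line then pvValB line else 0
      let r := pvWalkB rest
      (v + r.1, r.2.1, ⟨r.2.2.val, Nat.le_trans r.2.2.property (Nat.le_succ _)⟩)
  termination_by l => l.length
  decreasing_by
  · exact Nat.lt_succ_of_le (Nat.le_refl _)
  · exact Nat.lt_succ_of_le r1.2.2.property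
  · exact Nat.lt_succ_of_le (Nat.le_refl _)

def day7_alt (s : List String) (part2 : Bool) : Int :=
  let sizes := (pvWalkB s).2.1
  if !part2 then (sizes.filter (fun x => x ≤ 100000)).sum
  else
    let limit := (match sizes with | [] => 0 | h :: t => t.foldl max h) - 40000000
    match sizes.filter (fun x => limit ≤ x) with
    | [] => 0
    | h :: t => t.foldl min h

-- ===== PRECONDITION & SPEC =====
-- structural well-formedness of the terminal log at running depth d (a balanced-parentheses
-- style check on the input lines, not a simulation of either port): every line is nonempty,
-- '$ cd ..' never closes the root (Python A pops/peeks an empty stack there: IndexError),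
-- a size line needs an open directory and an int()-parsable first token (else ValueError)
def pvOk : List String → Nat → Bool
  | [], _ => true
  | line :: rest, d =>
    if line = "$ cd .." then decide (2 ≤ d) && pvOk rest (d - 1)
    else if PySem.Str.startswith line "$ cd " then pvOk rest (d + 1)
    else if pvDigitA line then
      decide (1 ≤ d) &&
        (match (PySem.Str.split₀ line).head? with
         | some t => (PySem.Int.ofStr? t).isSome
         | none => false) &&
        pvOk rest d
    else !(line = "") && pvOk rest d

-- Pre_ excludes exactly the inputs where Python A raises: depth/emptiness/parse violations
-- above (IndexError/ValueError), and part2 on a log with no '$ cd name' line at all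
-- (max() of an empty sequence: ValueError)
def Pre_day7 (s : List String) (part2 : Bool) : Prop :=
  pvOk s 0 = true ∧ (part2 = true → s.any (fun l => PySem.Str.startswith l "$ cd ") = true)
instance (s : List String) (part2 : Bool) : Decidable (Pre_day7 s part2) := by
  unfold Pre_day7; infer_instance

def pvWitness_day7 : List String × Bool :=
  (["$ cd a", "100 b.txt", "$ cd b", "200 c.txt", "$ cd .."], true)

def Spec_day7 (s : List String) (part2 : Bool) (out : Int) : Prop := out = day7_alt s part2
instance (s : List String) (part2 : Bool) (out : Int) : Decidable (Spec_day7 s part2 out) := by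
  unfold Spec_day7; infer_instance

-- ===== CLAIM (what is proved, stated in full; the proofs are below) =====
def Claim_equal_day7 : Prop := ∀ (s : List String) (part2 : Bool), Dom_day7 s part2 → Pre_day7 s part2 → Spec_day7 s part2 (day7 s part2)

-- ===== LEMMAS AND PROOFS =====

-- ghost flag: did pvWalkB's scan of l stop at an unmatched '$ cd ..' (true) or run off the end?
def pvClosed : (l : List String) → Bool
  | [] => false
  | line :: rest =>
    if line = "$ cd .." then true
    else if PySem.Str.startswith line "$ cd " then pvClosed (pvWalkB rest).2.2.val
    else pvClosed rest
  termination_by l => l.length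
  decreasing_by
  · exact Nat.lt_succ_of_le (pvWalkB rest).2.2.property
  · exact Nat.lt_succ_of_le (Nat.le_refl _)

theorem pvVal_eq (line : String) : pvValB line = pvValA line := rfl

theorem pvDigit_guard (line : String) : (!(line = "") && pvDigitB line) = pvDigitA line := by
  by_cases h : line = ""
  · subst h; simp [pvDigitB, pvDigitA, PySem.Str.pyGet?, PySem.List.pyGet?, PySem.List.pyIdx?]
  · simp [h]; rfl

theorem pvClosed_false_rem : ∀ (l : List String), pvClosed l = false → (pvWalkB l).2.2.val = [] := by
  intro l
  induction l using pvClosed.induct with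
  | case1 => intro _; rw [pvWalkB]
  | case2 rest => intro hc; rw [pvClosed] at hc; simp at hc
  | case3 line rest h1 h2 ih =>
    intro hc
    have h2' := h2; simp at h2'
    rw [pvClosed] at hc; simp [h1, h2'] at hc
    rw [pvWalkB]; simp [h1, h2']
    exact ih hc
  | case4 line rest h1 h2 ih =>
    intro hc
    have h2' := h2; simp at h2'
    rw [pvClosed] at hc; simp [h1, h2'] at hc
    rw [pvWalkB]; simp [h1, h2']
    exact ih hc

-- main invariant: running A's loop body over l from stack (c :: cs) is described by pvWalkB l
theorem pvMain : ∀ (l : List String) (c : Int) (cs szs : List Int),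
    pvOk l (cs.length + 1) = true →
    (if pvClosed l then
       cs ≠ [] ∧
       pvOk (pvWalkB l).2.2.val cs.length = true ∧
       ∀ c' cs', cs = c' :: cs' →
         List.foldl pvStepA (c :: cs, szs) l =
           List.foldl pvStepA ((c' + (c + (pvWalkB l).1)) :: cs',
             szs ++ (pvWalkB l).2.1 ++ [c + (pvWalkB l).1]) (pvWalkB l).2.2.val
     else
       (List.foldl pvStepA (c :: cs, szs) l).2 ++ pvAccum (List.foldl pvStepA (c :: cs, szs) l).1 0 =
         szs ++ (pvWalkB l).2.1 ++ pvAccum ((c + (pvWalkB l).1) :: cs) 0) := by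
  intro l
  induction l using pvWalkB.induct with
  | case1 =>
    intro c cs szs _
    rw [pvClosed]; simp [pvWalkB, pvAccum]
  | case2 rest =>
    intro c cs szs hok
    rw [pvOk] at hok; simp at hok
    rw [pvClosed]; simp only [if_pos rfl, if_true]
    obtain ⟨hd, hrest⟩ := hok
    refine ⟨by intro h; subst h; simp at hd, ?_, ?_⟩
    · rw [pvWalkB]; simpa using hrest
    · intro c' cs' hcs; subst hcs
      rw [pvWalkB]; simp [pvStepA]
  | case3 line rest h1 h2 r1 ih1 ihx ih2 =>
    clear ihx
    intro c cs szs hok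
    have h2' := h2; simp at h2'
    have hok' : pvOk rest ((c :: cs).length + 1) = true := by
      rw [pvOk] at hok; simp [h1, h2'] at hok; simpa using hok
    have H1 := ih1 0 (c :: cs) szs hok'
    have hstep : pvStepA (c :: cs, szs) line = (0 :: c :: cs, szs) := by
      rw [pvStepA]; simp [h1, h2']
    have hcl : pvClosed (line :: rest) = pvClosed (pvWalkB rest).2.2.val := by
      rw [pvClosed]; simp [h1, h2']
    have hw1 : (pvWalkB (line :: rest)).1 = (pvWalkB rest).1 + (pvWalkB (pvWalkB rest).2.2.val).1 := by
      rw [pvWalkB]; simp [h1, h2']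
    have hw2 : (pvWalkB (line :: rest)).2.1
        = (pvWalkB rest).2.1 ++ [(pvWalkB rest).1] ++ (pvWalkB (pvWalkB rest).2.2.val).2.1 := by
      rw [pvWalkB]; simp [h1, h2']
    have hw3 : (pvWalkB (line :: rest)).2.2.val = (pvWalkB (pvWalkB rest).2.2.val).2.2.val := by
      rw [pvWalkB]; simp [h1, h2']
    by_cases hc1 : pvClosed rest
    · rw [if_pos hc1] at H1
      obtain ⟨-, hokrem, heq⟩ := H1
      have heq1 := heq c cs rfl
      have H2 := ih2 (c + (0 + (pvWalkB rest).1)) cs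
        (szs ++ (pvWalkB rest).2.1 ++ [0 + (pvWalkB rest).1]) (by simpa using hokrem)
      by_cases hc2 : pvClosed (pvWalkB rest).2.2.val
      · rw [if_pos hc2] at H2
        obtain ⟨hne, hokrem2, heq2⟩ := H2
        rw [hcl, if_pos hc2]
        refine ⟨hne, by rw [hw3]; exact hokrem2, ?_⟩
        intro c' cs' hcs
        rw [List.foldl_cons, hstep, heq1, heq2 c' cs' hcs, hw1, hw2, hw3]
        simp [List.append_assoc, add_assoc]
      · rw [if_neg hc2] at H2
        rw [hcl, if_neg hc2]
        rw [List.foldl_cons, hstep, heq1, H2, hw1, hw2]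
        simp [List.append_assoc, add_assoc]
    · rw [if_neg hc1] at H1
      have hrem : (pvWalkB rest).2.2.val = [] := pvClosed_false_rem rest (by simpa using hc1)
      have hcl2 : pvClosed (line :: rest) = false := by rw [hcl, hrem]; rw [pvClosed]
      rw [hcl2]; simp only [Bool.false_eq_true, if_false]
      rw [List.foldl_cons, hstep, H1, hw1, hw2, hrem]
      rw [pvWalkB]
      simp [pvAccum, List.append_assoc, add_assoc, add_comm]
  | case4 line rest h1 h2 ih =>
    intro c cs szs hok
    have h2' := h2; simp at h2'
    have hcl : pvClosed (line :: rest) = pvClosed rest := by rw [pvClosed]; simp [h1, h2']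
    -- the line's contribution v: equal in both ports
    have hguard := pvDigit_guard line
    have hw1 : (pvWalkB (line :: rest)).1
        = (if pvDigitA line then pvValA line else 0) + (pvWalkB rest).1 := by
      rw [pvWalkB]; simp [h1, h2', hguard, pvVal_eq]
    have hw2 : (pvWalkB (line :: rest)).2.1 = (pvWalkB rest).2.1 := by
      rw [pvWalkB]; simp [h1, h2']
    have hw3 : (pvWalkB (line :: rest)).2.2.val = (pvWalkB rest).2.2.val := by
      rw [pvWalkB]; simp [h1, h2']
    by_cases hd : pvDigitA line
    · have hok' : pvOk rest (cs.length + 1) = true := by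
        rw [pvOk] at hok; simp [h1, h2', hd] at hok; exact hok.2
      have hstep : pvStepA (c :: cs, szs) line = ((c + pvValA line) :: cs, szs) := by
        rw [pvStepA]; simp [h1, h2', hd]
      have H := ih (c + pvValA line) cs szs hok'
      by_cases hc : pvClosed rest
      · rw [if_pos hc] at H
        obtain ⟨hne, hokrem, heq⟩ := H
        rw [hcl, if_pos hc]
        refine ⟨hne, by rw [hw3]; exact hokrem, ?_⟩
        intro c' cs' hcs
        rw [List.foldl_cons, hstep, heq c' cs' hcs, hw1, hw2, hw3]
        simp [hd, List.append_assoc, add_assoc]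
      · rw [if_neg hc] at H
        rw [hcl, if_neg hc]
        rw [List.foldl_cons, hstep, H, hw1, hw2]
        simp [hd, List.append_assoc, add_assoc]
    · have hok' : pvOk rest (cs.length + 1) = true := by
        rw [pvOk] at hok; simp [h1, h2', hd] at hok; exact hok.2
      have hstep : pvStepA (c :: cs, szs) line = (c :: cs, szs) := by
        rw [pvStepA]; simp [h1, h2', hd]
      have H := ih c cs szs hok'
      by_cases hc : pvClosed rest
      · rw [if_pos hc] at H
        obtain ⟨hne, hokrem, heq⟩ := H
        rw [hcl, if_pos hc]
        refine ⟨hne, by rw [hw3]; exact hokrem, ?_⟩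
        intro c' cs' hcs
        rw [List.foldl_cons, hstep, heq c' cs' hcs, hw1, hw2, hw3]
        simp [hd]
      · rw [if_neg hc] at H
        rw [hcl, if_neg hc]
        rw [List.foldl_cons, hstep, H, hw1, hw2]
        simp [hd]

-- top level: from the empty stack, A's sizes (events ++ accumulate of the leftover stack)
-- are exactly B's collected sizes
theorem pvTop : ∀ (l : List String) (szs : List Int), pvOk l 0 = true →
    (List.foldl pvStepA ([], szs) l).2 ++ pvAccum (List.foldl pvStepA ([], szs) l).1 0 =
      szs ++ (pvWalkB l).2.1 := by
  intro l
  induction l with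
  | nil => intro szs _; simp [pvWalkB, pvAccum]
  | cons line rest ih =>
    intro szs hok
    by_cases h1 : line = "$ cd .."
    · rw [pvOk] at hok; simp [h1] at hok
    · by_cases h2 : PySem.Str.startswith line "$ cd " = true
      · have h2' := h2; simp at h2'
        have hok' : pvOk rest 1 = true := by
          rw [pvOk] at hok; simpa [h1, h2'] using hok
        have H := pvMain rest 0 [] szs (by simpa using hok')
        have hc : pvClosed rest = false := by
          by_cases hcc : pvClosed rest
          · rw [if_pos hcc] at H; exact absurd rfl H.1
          · simpa using hcc
        rw [hc] at H; simp only [Bool.false_eq_true, if_false] at H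
        have hrem := pvClosed_false_rem rest hc
        have hstep : pvStepA (([] : List Int), szs) line = ([0], szs) := by
          rw [pvStepA]; simp [h1, h2']
        rw [List.foldl_cons, hstep, H]
        rw [pvWalkB]
        simp [h1, h2', hrem, pvAccum, pvWalkB]
        rw [hrem, pvWalkB]
      · have h2' := h2; simp at h2'
        by_cases hd : pvDigitA line
        · rw [pvOk] at hok; simp [h1, h2', hd] at hok
        · have hok' : pvOk rest 0 = true := by
            rw [pvOk] at hok; simp [h1, h2', hd] at hok; exact hok.2
          have hstep : pvStepA (([] : List Int), szs) line = ([], szs) := by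
            rw [pvStepA]; simp [h1, h2', hd]
          rw [List.foldl_cons, hstep, ih szs hok']
          rw [pvWalkB]
          simp [h1, h2']

-- ===== VERDICT (by name: the statement is the Claim_ definition above) =====
theorem day7_spec : Claim_equal_day7 := by
  intro s part2 _hdom hpre
  have h := pvTop s [] hpre.1
  simp only [List.nil_append] at h
  unfold Spec_day7 day7 day7_alt
  simp only [h]
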